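-- pv_equiv track=rewrite | github.com/zuokangjia/DanmakuConvert | dmconvert/superchat/superchat_handler.py | get_text_line_num
-- ===== SOURCE A (Python) =====
-- def get_text_line_num(text):
--     line_num = 1
--     result_text = text
--
--     if len(text) > 15:
--         result_text = ""
--         for i in range(0, len(text), 15):
--             chunk = text[i : i + 15]
--             result_text += chunk
--             if i + 15 < len(text):
--                 result_text += "\\N"
--                 line_num += 1
--
--     return result_text, line_num
-- ===== SOURCE B (Python) =====
-- def get_text_line_num(text):
--     n = len(text)
--     line_num = max(1, -(-n // 15))
--     result = text[15 * (line_num - 1):]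
--     for start in range(15 * (line_num - 2), -1, -15):
--         result = text[start:start + 15] + "\\N" + result
--     return result, line_num
-- ===== Notes on version B (the rewrite author's own statement) =====
-- stated objective: alternative
-- what changed: B computes the line count up front as the closed form max(1, ceil(len/15)), starts from the final (short) chunk, and builds the result BACK-TO-FRONT by prepending each earlier 15-char chunk plus the separator over a descending range of chunk starts; A walks forward, accumulating with += and counting inside a lookahead branch.
import Mathlib
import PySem

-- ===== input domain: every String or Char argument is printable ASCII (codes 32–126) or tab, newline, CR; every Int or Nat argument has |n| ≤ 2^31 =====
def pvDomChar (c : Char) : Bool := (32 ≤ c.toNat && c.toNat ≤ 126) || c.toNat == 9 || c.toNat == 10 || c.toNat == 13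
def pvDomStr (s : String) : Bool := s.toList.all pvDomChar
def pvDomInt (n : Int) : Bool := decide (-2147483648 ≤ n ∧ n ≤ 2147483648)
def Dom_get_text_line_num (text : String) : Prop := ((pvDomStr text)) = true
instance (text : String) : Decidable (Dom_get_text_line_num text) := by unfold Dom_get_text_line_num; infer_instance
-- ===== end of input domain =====

-- B computes the line count as a closed form max(1, ceil(len/15)) and builds the result
-- back-to-front, prepending chunks over a descending range, instead of A's forward
-- accumulate-count-and-lookahead loop (objective: alternative).


-- ===== PORT A =====
-- literal transliteration of A: running string + counter, counter bumped when another chunk follows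
def get_text_line_num (text : String) : String × Int :=
  let cs := text.toList
  let n : Int := PySem.Chars.len cs
  if n > 15 then
    let st := (PySem.List.pyRange 0 n 15).foldl
      (fun (st : List Char × Int) i =>
        let chunk := PySem.List.slice cs (some i) (some (i + 15))
        let r := st.1 ++ chunk
        if i + 15 < n then (r ++ ['\\', 'N'], st.2 + 1) else (r, st.2))
      ([], 1)
    (String.ofList st.1, st.2)
  else (text, 1)

-- ===== PORT B =====
-- literal transliteration of B: closed-form line count, then prepend chunks over a descending range
def get_text_line_num_alt (text : String) : String × Int :=
  let cs := text.toList
  let n : Int := PySem.Chars.len cs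
  let line_num : Int := max 1 (-(PySem.Int.floordiv (-n) 15))
  let result := PySem.List.slice cs (some (15 * (line_num - 1))) none
  let result := (PySem.List.pyRange (15 * (line_num - 2)) (-1) (-15)).foldl
    (fun r start => PySem.List.slice cs (some start) (some (start + 15)) ++ ['\\', 'N'] ++ r)
    result
  (String.ofList result, line_num)

-- ===== PRECONDITION & SPEC =====
def Spec_get_text_line_num (text : String) (out : String × Int) : Prop := out = get_text_line_num_alt text
instance (text : String) (out : String × Int) : Decidable (Spec_get_text_line_num text out) := by unfold Spec_get_text_line_num; infer_instance

-- ===== CLAIM (what is proved, stated in full; the proofs are below) =====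
def Claim_equal_get_text_line_num : Prop := ∀ (text : String), Dom_get_text_line_num text → Spec_get_text_line_num text (get_text_line_num text)

-- ===== LEMMAS AND PROOFS =====

-- a step-15 range unfolds by one chunk
theorem pvRange15_cons (a b : Int) (h : a < b) :
    PySem.List.pyRange a b 15 = a :: PySem.List.pyRange (a + 15) b 15 := by
  rw [PySem.List.pyRange_of_pos a b (by norm_num), PySem.List.pyRange_of_pos (a+15) b (by norm_num)]
  have hm : (if a < b then ((b - a + 15 - 1) / 15).toNat else 0)
      = (if a + 15 < b then ((b - (a + 15) + 15 - 1) / 15).toNat else 0) + 1 := by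
    split_ifs <;> omega
  rw [hm, List.range_succ_eq_map, List.map_cons, List.map_map]
  refine congrArg₂ _ (by ring) (List.map_congr_left ?_)
  intro k _
  simp [Function.comp]
  ring

theorem pvRange15_nil (a b : Int) (h : b ≤ a) :
    PySem.List.pyRange a b 15 = [] := by
  rw [PySem.List.pyRange_of_pos a b (by norm_num)]
  simp [show ¬ a < b by omega]

-- a step-(-15) range unfolds by one start (the largest one first)
theorem pvRangeNeg_cons (a b : Int) (h : b < a) :
    PySem.List.pyRange a b (-15) = a :: PySem.List.pyRange (a - 15) b (-15) := by
  rw [PySem.List.pyRange_of_neg a b (by norm_num), PySem.List.pyRange_of_neg (a-15) b (by norm_num)]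
  rw [show (- -(15:Int)) = 15 from by norm_num]
  have hm : (if b < a then ((a - b + 15 - 1) / 15).toNat else 0)
      = (if b < a - 15 then ((a - 15 - b + 15 - 1) / 15).toNat else 0) + 1 := by
    split_ifs <;> omega
  rw [hm, List.range_succ_eq_map, List.map_cons, List.map_map]
  refine congrArg₂ _ (by ring) (List.map_congr_left ?_)
  intro k _
  simp [Function.comp]
  ring

theorem pvRangeNeg_nil (a b : Int) (h : a ≤ b) :
    PySem.List.pyRange a b (-15) = [] := by
  rw [PySem.List.pyRange_of_neg a b (by norm_num)]
  simp [show ¬ b < a by omega]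

-- A's loop invariant: the forward fold appends the join of the remaining chunks and counts them
theorem pvLoop (cs : List Char) (k : Nat) :
    ∀ (a : Int) (r : List Char) (c : Int),
      0 ≤ a → a < (cs.length : Int) → ((cs.length : Int) - a).toNat ≤ k →
      (PySem.List.pyRange a (cs.length : Int) 15).foldl
        (fun (st : List Char × Int) i =>
          if i + 15 < (cs.length : Int)
          then (st.1 ++ PySem.List.slice cs (some i) (some (i + 15)) ++ ['\\', 'N'], st.2 + 1)
          else (st.1 ++ PySem.List.slice cs (some i) (some (i + 15)), st.2))
        (r, c)
      = (r ++ PySem.Chars.join ['\\', 'N']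
            ((PySem.List.pyRange a (cs.length : Int) 15).map
              (fun i => PySem.List.slice cs (some i) (some (i + 15)))),
         c + ((PySem.List.pyRange a (cs.length : Int) 15).length : Int) - 1) := by
  induction k with
  | zero => intro a r c ha hlt hk; omega
  | succ k ih =>
    intro a r c ha hlt hk
    rw [pvRange15_cons a _ hlt]
    by_cases hc : a + 15 < (cs.length : Int)
    · simp only [List.foldl_cons, if_pos hc]
      rw [ih (a + 15) _ _ (by omega) hc (by omega)]
      rw [pvRange15_cons (a + 15) _ hc]
      simp only [List.map_cons, PySem.Chars.join_cons_cons, List.length_cons]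
      rw [Prod.mk.injEq]
      constructor
      · simp [List.append_assoc]
      · push_cast; ring
    · rw [pvRange15_nil (a + 15) _ (by omega)]
      simp only [List.foldl_cons, if_neg hc, List.map_cons, List.map_nil, List.foldl_nil,
        PySem.Chars.join_singleton, List.length_cons, List.length_nil]
      norm_num

-- the length of the step-15 range is the ceiling count of chunks
theorem pvRangeLen (n : Int) (h : 0 < n) :
    ((PySem.List.pyRange 0 n 15).length : Int) = PySem.Int.floordiv (n + 14) 15 := by
  rw [PySem.List.pyRange_of_pos 0 n (by norm_num),
      PySem.Int.floordiv_eq_ediv_of_pos (by norm_num)]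
  simp only [List.length_map, List.length_range, if_pos h]
  omega

-- B's loop invariant: prepending chunks over the descending range below start 15*j,
-- starting from the join of the chunks from 15*j on, yields the join of all chunks
theorem pvBack (cs : List Char) (j : Nat) (h : 15 * (j : Int) < (cs.length : Int)) :
    (PySem.List.pyRange (15 * (j : Int) - 15) (-1) (-15)).foldl
      (fun r s => PySem.List.slice cs (some s) (some (s + 15)) ++ ['\\', 'N'] ++ r)
      (PySem.Chars.join ['\\', 'N']
        ((PySem.List.pyRange (15 * (j : Int)) (cs.length : Int) 15).map
          (fun i => PySem.List.slice cs (some i) (some (i + 15)))))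
    = PySem.Chars.join ['\\', 'N']
        ((PySem.List.pyRange 0 (cs.length : Int) 15).map
          (fun i => PySem.List.slice cs (some i) (some (i + 15)))) := by
  induction j with
  | zero =>
    rw [pvRangeNeg_nil _ _ (by norm_num)]
    simp
  | succ j ih =>
    push_cast at h ⊢
    have hj : 15 * (j : Int) < (cs.length : Int) := by omega
    rw [show (15 * ((j : Int) + 1) - 15) = 15 * (j : Int) by ring,
        show (15 * ((j : Int) + 1)) = 15 * (j : Int) + 15 by ring,
        pvRangeNeg_cons _ _ (by omega), List.foldl_cons]
    have hjoin :
        PySem.List.slice cs (some (15 * (j : Int))) (some (15 * (j : Int) + 15)) ++ ['\\', 'N'] ++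
            PySem.Chars.join ['\\', 'N']
              ((PySem.List.pyRange (15 * (j : Int) + 15) (cs.length : Int) 15).map
                (fun i => PySem.List.slice cs (some i) (some (i + 15))))
          = PySem.Chars.join ['\\', 'N']
              ((PySem.List.pyRange (15 * (j : Int)) (cs.length : Int) 15).map
                (fun i => PySem.List.slice cs (some i) (some (i + 15)))) := by
      rw [pvRange15_cons (15 * (j : Int)) _ hj,
          pvRange15_cons (15 * (j : Int) + 15) _ (by omega)]
      simp only [List.map_cons, PySem.Chars.join_cons_cons]
    rw [hjoin]
    exact ih hj

-- the chunk-count bracket: m = max 1 (-((-n)//15)) satisfies (m-1)*15 < n ≤ m*15 for n > 0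
theorem pvCeilBracket (n : Int) (h : 0 < n) :
    ((max 1 (-(PySem.Int.floordiv (-n) 15)) - 1) * 15 < n ∧
      n ≤ max 1 (-(PySem.Int.floordiv (-n) 15)) * 15) := by
  have hb := (PySem.Int.neg_floordiv_neg_eq_iff_of_pos
    (a := n) (b := 15) (q := -(PySem.Int.floordiv (-n) 15)) (by norm_num)).mp rfl
  rcases hb with ⟨h1, h2⟩
  constructor
  · rcases max_cases 1 (-(PySem.Int.floordiv (-n) 15)) with ⟨he, hle⟩ | ⟨he, hlt⟩ <;>
      rw [he] <;> nlinarith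
  · rcases max_cases 1 (-(PySem.Int.floordiv (-n) 15)) with ⟨he, hle⟩ | ⟨he, hlt⟩ <;>
      rw [he] <;> nlinarith

-- ===== VERDICT (by name: the statement is the Claim_ definition above) =====
theorem get_text_line_num_spec : Claim_equal_get_text_line_num := by
  intro text _
  unfold Spec_get_text_line_num
  simp only [get_text_line_num, get_text_line_num_alt, PySem.Chars.len_eq]
  by_cases h : ((text.toList.length : Int) > 15)
  · rw [if_pos h]
    refine Eq.trans (congrArg (fun p : List Char × Int => ((String.ofList p.1, p.2) : String × Int))
      (pvLoop text.toList text.toList.length 0 [] 1 (by norm_num) (by omega) (by omega))) ?_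
    set cs := text.toList with hcs
    set m : Int := max 1 (-(PySem.Int.floordiv (-((cs.length : Nat) : Int)) 15)) with hm
    obtain ⟨h1, h2⟩ := hm ▸ pvCeilBracket ((cs.length : Nat) : Int) (by omega)
    have hm2 : 2 ≤ m := by omega
    have hj : (((m - 1).toNat : Nat) : Int) = m - 1 := by omega
    have hlast :
        PySem.List.slice cs (some (15 * (m - 1))) none
          = PySem.Chars.join ['\\', 'N']
              ((PySem.List.pyRange (15 * (((m - 1).toNat : Nat) : Int)) ((cs.length : Nat) : Int) 15).map
                (fun i => PySem.List.slice cs (some i) (some (i + 15)))) := by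
      have hdrop : PySem.List.slice cs (some (15 * (m - 1))) none = cs.drop (15 * (m - 1)).toNat := by
        simp [PySem.List.slice_from, show (0:Int) ≤ 15 * (m - 1) from by omega]
      rw [hdrop, hj, pvRange15_cons (15 * (m - 1)) _ (by omega), pvRange15_nil (15 * (m - 1) + 15) _ (by omega),
          List.map_cons, List.map_nil, PySem.Chars.join_singleton,
          PySem.List.slice_toNat _ (by omega) (by omega),
          show ((15 * (m - 1) + 15).toNat - (15 * (m - 1)).toNat) = 15 from by omega]
      refine (List.take_of_length_le ?_).symm
      simp only [List.length_drop]
      omega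
    rw [hlast, show (15 * (m - 2)) = 15 * (((m - 1).toNat : Nat) : Int) - 15 from by omega,
        pvBack cs (m - 1).toNat (by rw [hj]; omega)]
    rw [Prod.mk.injEq]
    refine ⟨rfl, ?_⟩
    rw [pvRangeLen _ (by omega), PySem.Int.floordiv_eq_ediv_of_pos (b := 15) (by norm_num)]
    omega
  · rw [if_neg h]
    set cs := text.toList with hcs
    set m : Int := max 1 (-(PySem.Int.floordiv (-((cs.length : Nat) : Int)) 15)) with hm
    have hm1 : m = 1 := by
      by_cases h0 : (0 : Int) < ((cs.length : Nat) : Int)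
      · obtain ⟨h1, h2⟩ := hm ▸ pvCeilBracket ((cs.length : Nat) : Int) h0
        have hge : (1 : Int) ≤ m := hm ▸ le_max_left 1 _
        omega
      · have h0' : cs.length = 0 := by omega
        rw [hm, h0']
        decide
    rw [hm1, show (15 * ((1:Int) - 2)) = (-15 : Int) from by norm_num,
        pvRangeNeg_nil (-15) (-1) (by norm_num), List.foldl_nil,
        show (15 * ((1:Int) - 1)) = ((0 : Nat) : Int) from by norm_num,
        PySem.List.slice_from_natCast, List.drop_zero]
    rw [Prod.mk.injEq]
    exact ⟨(String.ofList_toList (s := text)).symm, rfl⟩
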